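-- pv_equiv track=rewrite | github.com/ldjkiller/AnswerRecognition | pic_rec/pic_rec_main.py | deal_lis
-- ===== SOURCE A (Python) =====
-- def deal_lis(lis, answer_map):
--     # 计算题目与题目之间的距离，并生成坐标
--     start = lis[0]
--     res = []
--     answer_lis = []
--     for v in lis[1:]:
--         y, x, h, width = start
--         y2, x2, h2, width2 = v
--         answers = [answer_map[i] for i in range(x, x2, 1) if i in answer_map]
--         start = v
--         # 小于0的数都为0
--         res.append([y, x - 15 if x - 15 > 0 else 0, x2 - x + 30, width])
--         answer_lis.append(answers)
--     return res, answer_lis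
-- ===== SOURCE B (Python) =====
-- from bisect import bisect_left
--
--
-- def deal_lis(lis, answer_map):
--     # sort the answer keys once, then bisect each x-interval instead of
--     # scanning every integer in range(x, x2)
--     keys = sorted(answer_map)
--     pairs = list(zip(lis, lis[1:]))
--     res = [[y, max(x - 15, 0), x2 - x + 30, w]
--            for (y, x, h, w), (y2, x2, h2, w2) in pairs]
--     answer_lis = [[answer_map[k] for k in keys[bisect_left(keys, x):bisect_left(keys, x2)]]
--                   for (_, x, _, _), (_, x2, _, _) in pairs]
--     return res, answer_lis
-- ===== Notes on version B (the rewrite author's own statement) =====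
-- stated objective: alternative
-- what changed: Instead of scanning every integer in range(x, x2) per pair and testing dict membership, B sorts the answer_map keys once and bisects each interval to collect only the keys that exist; the per-pair loop over lis[1:] with a running 'start' becomes zip(lis, lis[1:]) comprehensions.
import Mathlib
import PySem

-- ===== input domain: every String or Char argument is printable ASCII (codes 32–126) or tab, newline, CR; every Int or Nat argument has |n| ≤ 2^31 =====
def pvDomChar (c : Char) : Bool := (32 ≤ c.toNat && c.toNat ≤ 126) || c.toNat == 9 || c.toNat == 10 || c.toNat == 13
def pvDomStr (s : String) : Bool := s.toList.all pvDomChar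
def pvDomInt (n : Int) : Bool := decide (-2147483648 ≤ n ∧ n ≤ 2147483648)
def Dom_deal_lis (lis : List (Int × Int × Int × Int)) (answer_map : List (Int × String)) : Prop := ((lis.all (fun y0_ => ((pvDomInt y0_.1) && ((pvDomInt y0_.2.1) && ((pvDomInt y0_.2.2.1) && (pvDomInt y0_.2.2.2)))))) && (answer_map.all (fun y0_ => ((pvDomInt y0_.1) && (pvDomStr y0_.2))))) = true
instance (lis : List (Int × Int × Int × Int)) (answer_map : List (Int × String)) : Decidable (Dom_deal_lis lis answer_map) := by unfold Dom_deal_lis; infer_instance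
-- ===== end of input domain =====

-- B replaces A's per-pair scan of every integer in range(x, x2) by one sort of the
-- answer_map keys plus a bisect per interval (objective: alternative).

-- ===== PORT A =====
def deal_lis (lis : List (Int × Int × Int × Int)) (answer_map : List (Int × String)) : List (List Int) × List (List String) :=
  match lis with
  | [] => ([], [])   -- lis[0] raises IndexError here; excluded by Pre_deal_lis
  | start0 :: rest =>
    let d : PySem.Dict Int String := PySem.Dict.ofList answer_map
    let st := rest.foldl
      (fun (st : (Int × Int × Int × Int) × List (List Int) × List (List String)) v =>
        -- y, x, h, width = start; y2, x2, h2, width2 = v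
        let y := st.1.1; let x := st.1.2.1; let width := st.1.2.2.2
        let x2 := v.2.1
        -- answers = [answer_map[i] for i in range(x, x2, 1) if i in answer_map]
        let answers := ((PySem.List.pyRange x x2 1).filter (fun i => d.contains i)).map (fun i => d.getD i "")
        (v, st.2.1 ++ [[y, if x - 15 > 0 then x - 15 else 0, x2 - x + 30, width]], st.2.2 ++ [answers]))
      (start0, [], [])
    (st.2.1, st.2.2)

-- ===== PORT B =====
def deal_lis_alt (lis : List (Int × Int × Int × Int)) (answer_map : List (Int × String)) : List (List Int) × List (List String) :=
  let d : PySem.Dict Int String := PySem.Dict.ofList answer_map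
  -- keys = sorted(answer_map)
  let keys := PySem.List.sorted d.keys (fun k => k)
  -- pairs = list(zip(lis, lis[1:]))
  let pairs := lis.zip (PySem.List.slice lis (some 1) none)
  (pairs.map (fun p => [p.1.1, max (p.1.2.1 - 15) 0, p.2.2.1 - p.1.2.1 + 30, p.1.2.2.2]),
   pairs.map (fun p =>
     (PySem.List.slice keys (some ((PySem.List.bisectLeft keys p.1.2.1 : Nat) : Int))
        (some ((PySem.List.bisectLeft keys p.2.2.1 : Nat) : Int))).map (fun k => d.getD k "")))

-- ===== PRECONDITION & SPEC =====
-- Pre_ excludes only the empty lis, on which A raises IndexError at lis[0].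
def Pre_deal_lis (lis : List (Int × Int × Int × Int)) (answer_map : List (Int × String)) : Prop := lis ≠ []
instance (lis : List (Int × Int × Int × Int)) (answer_map : List (Int × String)) : Decidable (Pre_deal_lis lis answer_map) := by unfold Pre_deal_lis; infer_instance
def pvWitness_deal_lis : (List (Int × Int × Int × Int)) × (List (Int × String)) := ([(1, 2, 3, 4), (5, 6, 7, 8)], [(3, "A")])

def Spec_deal_lis (lis : List (Int × Int × Int × Int)) (answer_map : List (Int × String)) (out : List (List Int) × List (List String)) : Prop := out = deal_lis_alt lis answer_map
instance (lis : List (Int × Int × Int × Int)) (answer_map : List (Int × String)) (out : List (List Int) × List (List String)) : Decidable (Spec_deal_lis lis answer_map out) := by unfold Spec_deal_lis; infer_instance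

-- ===== CLAIM (what is proved, stated in full; the proofs are below) =====
def Claim_equal_deal_lis : Prop := ∀ (lis : List (Int × Int × Int × Int)) (answer_map : List (Int × String)), Dom_deal_lis lis answer_map → Pre_deal_lis lis answer_map → Spec_deal_lis lis answer_map (deal_lis lis answer_map)

-- ===== LEMMAS AND PROOFS =====

-- A's loop body, named so the fold can be reasoned about.
def stepA (d : PySem.Dict Int String)
    (st : (Int × Int × Int × Int) × List (List Int) × List (List String))
    (v : Int × Int × Int × Int) :
    (Int × Int × Int × Int) × List (List Int) × List (List String) :=
  (v, st.2.1 ++ [[st.1.1, if st.1.2.1 - 15 > 0 then st.1.2.1 - 15 else 0, v.2.1 - st.1.2.1 + 30, st.1.2.2.2]],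
   st.2.2 ++ [((PySem.List.pyRange st.1.2.1 v.2.1 1).filter (fun i => d.contains i)).map (fun i => d.getD i "")])

-- A's fold over lis[1:] with a running 'start' builds exactly the per-consecutive-pair maps.
lemma deal_loop (d : PySem.Dict Int String) (rest : List (Int × Int × Int × Int)) :
    ∀ (start : Int × Int × Int × Int) (r : List (List Int)) (a : List (List String)),
    (rest.foldl (stepA d) (start, r, a)).2
      = (r ++ ((start :: rest).zip rest).map (fun p =>
            [p.1.1, if p.1.2.1 - 15 > 0 then p.1.2.1 - 15 else 0, p.2.2.1 - p.1.2.1 + 30, p.1.2.2.2]),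
         a ++ ((start :: rest).zip rest).map (fun p =>
            ((PySem.List.pyRange p.1.2.1 p.2.2.1 1).filter (fun i => d.contains i)).map (fun i => d.getD i ""))) := by
  induction rest with
  | nil => intro start r a; simp
  | cons v t ih =>
    intro start r a
    simp only [List.foldl_cons, List.zip_cons_cons, List.map_cons]
    rw [show stepA d (start, r, a) v = (v, r ++ [_], a ++ [_]) from rfl, ih]
    simp

-- The filtered integer scan over [x, x2) equals the bisected window of the sorted key list.
lemma collect_eq (d : PySem.Dict Int String) (hnd : d.keys.Nodup) (x x2 : Int) :
    (PySem.List.pyRange x x2 1).filter (fun i => d.contains i)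
      = PySem.List.slice (PySem.List.sorted d.keys (fun k => k))
          (some ((PySem.List.bisectLeft (PySem.List.sorted d.keys (fun k => k)) x : Nat) : Int))
          (some ((PySem.List.bisectLeft (PySem.List.sorted d.keys (fun k => k)) x2 : Nat) : Int)) := by
  set keys := PySem.List.sorted d.keys (fun k => k) with hk
  have hperm : keys.Perm d.keys := PySem.List.sorted_perm d.keys (fun k => k) false
  have hknd : keys.Nodup := hperm.nodup_iff.mpr hnd
  have hle : keys.Pairwise (fun a b => a ≤ b) := PySem.List.sorted_pairwise d.keys (fun k => k)
  have hlt : keys.Pairwise (fun a b => a < b) :=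
    (hle.and hknd).imp (fun h => lt_of_le_of_ne h.1 h.2)
  obtain ⟨hlo_le, hlo_lt, hlo_ge⟩ := PySem.List.bisectLeft_spec keys x hle
  obtain ⟨hhi_le, hhi_lt, hhi_ge⟩ := PySem.List.bisectLeft_spec keys x2 hle
  set lo := PySem.List.bisectLeft keys x with hlo
  set hi := PySem.List.bisectLeft keys x2 with hhi
  rw [PySem.List.slice_natCast]
  have hmemR : ∀ k, k ∈ (keys.drop lo).take (hi - lo) ↔ k ∈ keys ∧ x ≤ k ∧ k < x2 := by
    intro k
    constructor
    · intro hm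
      obtain ⟨j, hj, hkj⟩ := List.mem_iff_getElem.mp hm
      have hj' : j < hi - lo := lt_of_lt_of_le hj (by simp [List.length_take])
      have hjd : j < keys.length - lo := by
        have := hj; simp [List.length_take, List.length_drop] at this; omega
      have hlen : lo + j < keys.length := by omega
      have hval : ((keys.drop lo).take (hi - lo))[j] = keys[lo + j] := by
        rw [List.getElem_take, List.getElem_drop]
      rw [hval] at hkj
      refine ⟨hkj ▸ List.getElem_mem hlen, ?_, ?_⟩
      · exact hkj ▸ hlo_ge (lo + j) hlen (by omega)
      · exact hkj ▸ hhi_lt (lo + j) hlen (by omega)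
    · rintro ⟨hmk, hxk, hkx2⟩
      obtain ⟨j, hj, rfl⟩ := List.mem_iff_getElem.mp hmk
      have h1 : lo ≤ j := by
        by_contra h
        exact absurd (hlo_lt j hj (by omega)) (by omega)
      have h2 : j < hi := by
        by_contra h
        exact absurd (hhi_ge j hj (by omega)) (by omega)
      apply List.mem_iff_getElem.mpr
      refine ⟨j - lo, ?_, ?_⟩
      · simp [List.length_take, List.length_drop]; omega
      · rw [List.getElem_take, List.getElem_drop]
        congr 1; omega
  have hndL : ((PySem.List.pyRange x x2 1).filter (fun i => d.contains i)).Nodup :=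
    (PySem.List.nodup_pyRange_one x x2).filter _
  have hndR : ((keys.drop lo).take (hi - lo)).Nodup :=
    hknd.sublist ((List.take_sublist _ _).trans (List.drop_sublist _ _))
  have hsL : ((PySem.List.pyRange x x2 1).filter (fun i => d.contains i)).Pairwise (fun a b => a < b) :=
    (PySem.List.pairwise_lt_pyRange_one x x2).sublist List.filter_sublist
  have hsR : ((keys.drop lo).take (hi - lo)).Pairwise (fun a b => a < b) :=
    hlt.sublist ((List.take_sublist _ _).trans (List.drop_sublist _ _))
  refine List.Perm.eq_of_pairwise (fun a b _ _ h h' => absurd h' (asymm h)) hsL hsR ?_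
  refine (List.perm_ext_iff_of_nodup hndL hndR).mpr ?_
  intro k
  rw [hmemR, List.mem_filter, PySem.List.mem_pyRange_one]
  constructor
  · rintro ⟨⟨h1, h2⟩, h3⟩
    exact ⟨hperm.mem_iff.mpr ((PySem.Dict.contains_iff_mem_keys d k).mp h3), h1, h2⟩
  · rintro ⟨h1, h2, h3⟩
    exact ⟨⟨h2, h3⟩, (PySem.Dict.contains_iff_mem_keys d k).mpr (hperm.mem_iff.mp h1)⟩

lemma deal_lis_eq_alt (lis : List (Int × Int × Int × Int)) (answer_map : List (Int × String))
    (h : lis ≠ []) : deal_lis lis answer_map = deal_lis_alt lis answer_map := by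
  match lis with
  | [] => exact absurd rfl h
  | start0 :: rest =>
    set d : PySem.Dict Int String := PySem.Dict.ofList answer_map with hd
    have hstep : (fun (st : (Int × Int × Int × Int) × List (List Int) × List (List String)) v =>
        let y := st.1.1; let x := st.1.2.1; let width := st.1.2.2.2
        let x2 := v.2.1
        let answers := ((PySem.List.pyRange x x2 1).filter (fun i => d.contains i)).map (fun i => d.getD i "")
        (v, st.2.1 ++ [[y, if x - 15 > 0 then x - 15 else 0, x2 - x + 30, width]], st.2.2 ++ [answers]))
        = stepA d := rfl
    show ((rest.foldl _ (start0, [], [])).2.1, (rest.foldl _ (start0, [], [])).2.2) = _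
    rw [hstep]
    have hloop := deal_loop d rest start0 [] []
    unfold deal_lis_alt
    rw [PySem.List.slice_from_one]
    show ((rest.foldl (stepA d) (start0, ([] : List (List Int)), ([] : List (List String)))).2.1,
          (rest.foldl (stepA d) (start0, [], [])).2.2) = _
    rw [show ((rest.foldl (stepA d) (start0, ([] : List (List Int)), ([] : List (List String)))).2.1,
          (rest.foldl (stepA d) (start0, [], [])).2.2) = (rest.foldl (stepA d) (start0, [], [])).2 from rfl]
    rw [hloop]
    simp only [List.nil_append, List.tail_cons]
    refine Prod.ext ?_ ?_
    · simp only
      apply List.map_congr_left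
      intro p _
      have hmax : (if p.1.2.1 - 15 > 0 then p.1.2.1 - 15 else 0) = max (p.1.2.1 - 15) 0 := by
        split_ifs with h' <;> omega
      rw [hmax]
    · simp only
      apply List.map_congr_left
      intro p _
      rw [collect_eq d (PySem.Dict.nodup_keys_ofList answer_map) p.1.2.1 p.2.2.1]

-- ===== VERDICT (by name: the statement is the Claim_ definition above) =====
theorem deal_lis_spec : Claim_equal_deal_lis := by
  intro lis answer_map _ hpre
  exact deal_lis_eq_alt lis answer_map hpre
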